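-- pv_equiv track=rewrite | github.com/btimbermont/adventofcode | 2023/day12/day12.py | generate_possible_functional_springs
-- ===== SOURCE A (Python) =====
-- from typing import List
--
-- def generate_part_lists(total_amount, parts, current_list=[]):
--     result = []
--     if parts == 0:
--         # If no more parts are left, check if the total amount is zero
--         if total_amount == 0 and all(part != 0 for part in current_list):
--             result.append(current_list)
--         return result
--
--     # Iterate through possible values for the current part
--     for i in range(1, total_amount + 1):
--         # Recursively call the function with reduced total_amount and parts
--         result += generate_part_lists(total_amount - i, parts - 1, current_list + [i])
--
--     return result
--
-- def generate_possible_functional_springs(total_length: int, broken_springs: [int]) -> List[List[int]]: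
--     result = []
--     number_of_functional_springs = total_length - sum(broken_springs)
--     # 1: broken parts at both ends
--     intervals = len(broken_springs) - 1
--     functional_springs = generate_part_lists(number_of_functional_springs, intervals)
--     result.extend([[0] + s + [0] for s in functional_springs])
--     # 2: broken part at start or end (not both!)
--     intervals += 1
--     functional_springs = generate_part_lists(number_of_functional_springs, intervals)
--     result.extend([[0] + s for s in functional_springs])
--     result.extend([s + [0] for s in functional_springs])
--     # 3: functional springs at both ends
--     intervals += 1
--     functional_springs = generate_part_lists(number_of_functional_springs, intervals)
--     result.extend(functional_springs)
--
--     return result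
-- ===== SOURCE B (Python) =====
-- from typing import List
--
--
-- def _cut_combinations(lo, n, r):
--     # all strictly increasing r-tuples of cut positions from range(lo, n), lexicographic
--     if r == 0:
--         return [[]]
--     return [[c] + rest for c in range(lo, n) for rest in _cut_combinations(c + 1, n, r - 1)]
--
--
-- def _compositions(n, k):
--     # compositions of n into k positive parts via stars-and-bars cut positions
--     if k < 0:
--         return []
--     if k == 0:
--         return [[]] if n == 0 else []
--     if n < k:
--         return []
--     result = []
--     for cuts in _cut_combinations(1, n, k - 1):
--         bounds = [0] + cuts + [n]
--         result.append([bounds[i + 1] - bounds[i] for i in range(k)])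
--     return result
--
--
-- def generate_possible_functional_springs(total_length: int, broken_springs: [int]) -> List[List[int]]:
--     n = total_length - sum(broken_springs)
--     k = len(broken_springs) - 1
--     middle = _compositions(n, k)
--     ends_one = _compositions(n, k + 1)
--     ends_both = _compositions(n, k + 2)
--     return ([[0] + s + [0] for s in middle]
--             + [[0] + s for s in ends_one]
--             + [s + [0] for s in ends_one]
--             + ends_both)
-- ===== Notes on version B (the rewrite author's own statement) =====
-- stated objective: alternative
-- what changed: Replaces A's prefix-accumulator recursion over successive part values with a stars-and-bars enumeration: list the strictly increasing tuples of cut positions in range(1, n) and emit the consecutive differences, with explicit guards for k<0, k==0 and n<k.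
import Mathlib
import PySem

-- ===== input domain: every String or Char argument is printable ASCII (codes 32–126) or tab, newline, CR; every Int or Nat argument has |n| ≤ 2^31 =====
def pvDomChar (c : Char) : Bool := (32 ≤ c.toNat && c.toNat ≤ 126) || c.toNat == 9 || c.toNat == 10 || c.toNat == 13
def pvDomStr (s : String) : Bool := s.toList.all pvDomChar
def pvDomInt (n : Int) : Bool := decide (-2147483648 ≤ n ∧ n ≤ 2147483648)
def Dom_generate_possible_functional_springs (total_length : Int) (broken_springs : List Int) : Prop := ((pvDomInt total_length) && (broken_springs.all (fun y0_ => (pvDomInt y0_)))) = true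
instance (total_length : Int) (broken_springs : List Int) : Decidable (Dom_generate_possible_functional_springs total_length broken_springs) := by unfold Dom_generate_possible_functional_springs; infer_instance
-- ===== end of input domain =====

-- B replaces A's prefix-accumulator recursion over part values by a stars-and-bars
-- enumeration of cut positions (objective: alternative algorithm of similar cost).

-- ===== PORT A =====
-- generate_part_lists(total_amount, parts, current_list=[]); all call sites pass the default [] explicitly
def generate_part_lists (total_amount : Int) (parts : Int) (current_list : List Int) : List (List Int) :=
  if parts = 0 then
    if total_amount = 0 ∧ current_list.all (fun p => p != 0) = true then [current_list] else []
  else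
    (PySem.List.pyRange 1 (total_amount + 1) 1).attach.foldl
      (fun result x =>
        result ++ generate_part_lists (total_amount - x.1) (parts - 1) (current_list ++ [x.1])) []
termination_by total_amount.toNat
decreasing_by
  have h := PySem.List.mem_pyRange_one.mp x.2
  omega

def generate_possible_functional_springs (total_length : Int) (broken_springs : List Int) : List (List Int) :=
  let result : List (List Int) := []
  let number_of_functional_springs := total_length - broken_springs.sum
  let intervals : Int := (broken_springs.length : Int) - 1
  let functional_springs := generate_part_lists number_of_functional_springs intervals []
  let result := result ++ functional_springs.map (fun s => [0] ++ s ++ [0])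
  let intervals := intervals + 1
  let functional_springs := generate_part_lists number_of_functional_springs intervals []
  let result := result ++ functional_springs.map (fun s => [0] ++ s)
  let result := result ++ functional_springs.map (fun s => s ++ [0])
  let intervals := intervals + 1
  let functional_springs := generate_part_lists number_of_functional_springs intervals []
  result ++ functional_springs

-- ===== PORT B =====
-- all strictly increasing r-tuples of cut positions drawn from range(lo, n), lexicographic
def cut_combinations (lo : Int) (n : Int) (r : Nat) : List (List Int) :=
  match r with
  | 0 => [[]]
  | r + 1 =>
      (PySem.List.pyRange lo n 1).flatMap
        (fun c => (cut_combinations (c + 1) n r).map (fun rest => c :: rest))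

-- consecutive gap sizes delimited by the cut positions, ending at n
def diffs (prev : Int) (cuts : List Int) (n : Int) : List Int :=
  match cuts with
  | [] => [n - prev]
  | c :: rest => (c - prev) :: diffs c rest n

def compositions (n : Int) (k : Int) : List (List Int) :=
  if k < 0 then []
  else if k = 0 then (if n = 0 then [[]] else [])
  else if n < k then []
  else (cut_combinations 1 n (k - 1).toNat).map (fun cuts => diffs 0 cuts n)

def generate_possible_functional_springs_alt (total_length : Int) (broken_springs : List Int) : List (List Int) :=
  let n := total_length - broken_springs.sum
  let k : Int := (broken_springs.length : Int) - 1
  let middle := compositions n k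
  let ends_one := compositions n (k + 1)
  let ends_both := compositions n (k + 2)
  (middle.map (fun s => [0] ++ s ++ [0]))
    ++ (ends_one.map (fun s => [0] ++ s))
    ++ (ends_one.map (fun s => s ++ [0]))
    ++ ends_both

-- ===== PRECONDITION & SPEC =====
def Spec_generate_possible_functional_springs (total_length : Int) (broken_springs : List Int) (out : List (List Int)) : Prop := out = generate_possible_functional_springs_alt total_length broken_springs
instance (total_length : Int) (broken_springs : List Int) (out : List (List Int)) : Decidable (Spec_generate_possible_functional_springs total_length broken_springs out) := by unfold Spec_generate_possible_functional_springs; infer_instance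

-- ===== CLAIM (what is proved, stated in full; the proofs are below) =====
def Claim_equal_generate_possible_functional_springs : Prop := ∀ (total_length : Int) (broken_springs : List Int), Dom_generate_possible_functional_springs total_length broken_springs → Spec_generate_possible_functional_springs total_length broken_springs (generate_possible_functional_springs total_length broken_springs)

-- ===== LEMMAS AND PROOFS =====

lemma gpl_flatMap (n k : Int) (cur : List Int) (hk : k ≠ 0) :
    generate_part_lists n k cur
      = (PySem.List.pyRange 1 (n + 1) 1).flatMap
          (fun i => generate_part_lists (n - i) (k - 1) (cur ++ [i])) := by
  rw [generate_part_lists]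
  simp only [hk, if_false, PySem.List.foldl_append_eq_flatMap, List.nil_append]
  simp [List.flatMap]

lemma gpl_zero (k : Int) (cur : List Int) (hk : k ≠ 0) :
    generate_part_lists 0 k cur = [] := by
  rw [gpl_flatMap _ _ _ hk]
  simp

lemma gpl_acc (N : Nat) : ∀ (n k : Int) (cur : List Int), n.toNat < N →
    (∀ p ∈ cur, p ≠ 0) →
    generate_part_lists n k cur = (generate_part_lists n k []).map (cur ++ ·) := by
  induction N with
  | zero => intro n k cur h _; omega
  | succ N ih =>
    intro n k cur hN hcur
    by_cases hk : k = 0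
    · subst hk
      rw [generate_part_lists, generate_part_lists]
      by_cases hn : n = 0
      · have hall : cur.all (fun p => p != 0) = true := by
          simp only [List.all_eq_true]
          intro p hp; simpa using hcur p hp
        simp [hn, hall]
      · simp [hn]
    · rw [gpl_flatMap _ _ _ hk, gpl_flatMap _ _ [] hk, List.map_flatMap]
      apply List.flatMap_congr
      intro i hi
      have hmem := PySem.List.mem_pyRange_one.mp hi
      have h1 : (n - i).toNat < N := by omega
      rw [ih (n - i) (k - 1) (cur ++ [i]) h1
            (by intro p hp; rcases List.mem_append.mp hp with h | h
                · exact hcur p h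
                · simp at h; omega),
          ih (n - i) (k - 1) ([] ++ [i]) h1 (by intro p hp; simp at hp; omega)]
      simp [List.map_map, Function.comp_def]

lemma gpl_acc' (n k : Int) (cur : List Int) (h : ∀ p ∈ cur, p ≠ 0) :
    generate_part_lists n k cur = (generate_part_lists n k []).map (cur ++ ·) :=
  gpl_acc (n.toNat + 1) n k cur (by omega) h

lemma gpl_neg (N : Nat) : ∀ (n k : Int) (cur : List Int), n.toNat < N → k < 0 →
    generate_part_lists n k cur = [] := by
  induction N with
  | zero => intro n k cur h _; omega
  | succ N ih =>
    intro n k cur hN hk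
    rw [gpl_flatMap _ _ _ (by omega)]
    rw [List.flatMap_eq_nil_iff]
    intro i hi
    have hmem := PySem.List.mem_pyRange_one.mp hi
    exact ih (n - i) (k - 1) (cur ++ [i]) (by omega) (by omega)

lemma gpl_small (R : Nat) : ∀ (k n : Int) (cur : List Int), k.toNat < R →
    1 ≤ k → n < k → generate_part_lists n k cur = [] := by
  induction R with
  | zero => intro k n cur h hk _; omega
  | succ R ih =>
    intro k n cur hR hk hn
    rw [gpl_flatMap _ _ _ (by omega)]
    by_cases hsmall : n + 1 ≤ 1
    · rw [PySem.List.pyRange_one_eq_nil hsmall]; rfl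
    · rw [List.flatMap_eq_nil_iff]
      intro i hi
      have hmem := PySem.List.mem_pyRange_one.mp hi
      exact ih (k - 1) (n - i) (cur ++ [i]) (by omega) (by omega) (by omega)

lemma gpl_one (m : Int) (hm : 1 ≤ m) : generate_part_lists m 1 [] = [[m]] := by
  rw [gpl_flatMap _ _ _ one_ne_zero]
  rw [PySem.List.pyRange_one_succ_right hm, List.flatMap_append]
  have h1 : (PySem.List.pyRange 1 m 1).flatMap
      (fun i => generate_part_lists (m - i) (1 - 1) ([] ++ [i])) = [] := by
    rw [List.flatMap_eq_nil_iff]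
    intro i hi
    have hmem := PySem.List.mem_pyRange_one.mp hi
    rw [generate_part_lists]
    simp
    omega
  rw [h1]
  simp only [List.nil_append, List.flatMap_cons, List.flatMap_nil, List.append_nil]
  rw [generate_part_lists]
  simp
  omega

lemma cuts_gpl (r : Nat) : ∀ (b n : Int), b < n →
    (cut_combinations (b + 1) n r).map (fun cuts => diffs b cuts n)
      = generate_part_lists (n - b) ((r : Int) + 1) [] := by
  induction r with
  | zero =>
    intro b n hb
    have h0 : ((0 : Nat) : Int) + 1 = 1 := by norm_num
    rw [cut_combinations, h0, gpl_one (n - b) (by omega)]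
    simp [diffs]
  | succ r ih =>
    intro b n hb
    have hb1 : (1:Int) ≤ n - b := by omega
    rw [cut_combinations, List.map_flatMap]
    have hcast : ((r + 1 : Nat) : Int) + 1 = (r : Int) + 1 + 1 := by push_cast; ring
    rw [hcast, gpl_flatMap _ _ _ (by omega)]
    have hsplit : n - b + 1 = (n - b) + 1 := rfl
    rw [PySem.List.pyRange_one_succ_right hb1, List.flatMap_append]
    have hlast : ([n - b] : List Int).flatMap
        (fun i => generate_part_lists (n - b - i) ((r : Int) + 1 + 1 - 1) ([] ++ [i])) = [] := by
      simp only [List.flatMap_cons, List.flatMap_nil, List.append_nil]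
      have h0 : n - b - (n - b) = 0 := by ring
      rw [h0, gpl_zero _ _ (by omega)]
    rw [hlast, List.append_nil]
    -- both sides as flatMap over List.range (n - b - 1).toNat
    rw [PySem.List.pyRange_one (b + 1) n, PySem.List.pyRange_one 1 (n - b), List.flatMap_map, List.flatMap_map]
    have hlen : (n - (b + 1)).toNat = (n - b - 1).toNat := by omega
    rw [hlen]
    apply List.flatMap_congr
    intro j hj
    have hjlt : (j : Int) < n - b - 1 := by
      have := List.mem_range.mp hj; omega
    have hc : b + 1 + (j : Int) < n := by omega
    -- LHS piece
    rw [List.map_map]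
    have hdif : ((fun cuts => diffs b cuts n) ∘ fun rest => (b + 1 + (j:Int)) :: rest)
        = (fun rest => (b + 1 + (j:Int) - b) :: diffs (b + 1 + (j:Int)) rest n) := by
      funext rest; simp [diffs]
    rw [hdif]
    have : (fun rest => (b + 1 + (j:Int) - b) :: diffs (b + 1 + (j:Int)) rest n)
        = (fun l => (b + 1 + (j:Int) - b) :: l) ∘ (fun cuts => diffs (b + 1 + (j:Int)) cuts n) := rfl
    rw [this, ← List.map_map, ih (b + 1 + (j:Int)) n hc]
    -- RHS piece
    rw [gpl_acc' _ _ ([] ++ [1 + (j:Int)]) (by intro p hp; simp at hp; omega)]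
    have e1 : n - b - (1 + (j:Int)) = n - (b + 1 + (j:Int)) := by ring
    have e2 : (r : Int) + 1 + 1 - 1 = (r : Int) + 1 := by ring
    rw [e1, e2]
    apply List.map_congr_left
    intro l _
    simp
    ring_nf

lemma gpl_eq_compositions (n k : Int) :
    generate_part_lists n k [] = compositions n k := by
  unfold compositions
  by_cases hneg : k < 0
  · rw [if_pos hneg, gpl_neg (n.toNat + 1) n k [] (by omega) hneg]
  · rw [if_neg hneg]
    by_cases hk0 : k = 0
    · subst hk0
      rw [if_pos rfl, generate_part_lists]
      by_cases hn : n = 0 <;> simp [hn]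
    · rw [if_neg hk0]
      by_cases hn : n < k
      · rw [if_pos hn, gpl_small (k.toNat + 1) k n [] (by omega) (by omega) hn]
      · rw [if_neg hn]
        have h := cuts_gpl (k - 1).toNat 0 n (by omega)
        have e1 : (0 : Int) + 1 = 1 := by norm_num
        have e2 : (((k - 1).toNat : Nat) : Int) + 1 = k := by omega
        have e3 : n - 0 = n := by ring
        rw [e1, e2, e3] at h
        exact h.symm

-- ===== VERDICT (by name: the statement is the Claim_ definition above) =====
theorem generate_possible_functional_springs_spec : Claim_equal_generate_possible_functional_springs := by
  intro total_length broken_springs _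
  unfold Spec_generate_possible_functional_springs
  unfold generate_possible_functional_springs generate_possible_functional_springs_alt
  simp only [gpl_eq_compositions]
  have e : (broken_springs.length : Int) - 1 + 1 + 1 = (broken_springs.length : Int) - 1 + 2 := by ring
  rw [e]
  simp [List.append_assoc]
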